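-- pv_equiv track=rewrite | github.com/SolRockProg/EI1022 | Entregables/E3_almi/entregable3_almi.py | n_letters
-- ===== SOURCE A (Python) =====
-- def n_letters(words) -> int:
--
--     letters = set()
--     how_many = 0
--     for word in words:
--         for letter in word:
--             if letter not in letters:
--                 letters.add(letter)
--                 how_many += 1
--     return how_many
-- ===== SOURCE B (Python) =====
-- def n_letters(words) -> int:
--     chars = sorted(c for word in words for c in word)
--     count = 0
--     prev = None
--     for c in chars:
--         if count == 0 or c != prev:
--             count += 1
--         prev = c
--     return count
-- ===== Notes on version B (the rewrite author's own statement) =====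
-- stated objective: alternative
-- what changed: Replaces the hash-set membership loop with flatten-then-sort and a single scan counting adjacent changes.
import Mathlib
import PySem

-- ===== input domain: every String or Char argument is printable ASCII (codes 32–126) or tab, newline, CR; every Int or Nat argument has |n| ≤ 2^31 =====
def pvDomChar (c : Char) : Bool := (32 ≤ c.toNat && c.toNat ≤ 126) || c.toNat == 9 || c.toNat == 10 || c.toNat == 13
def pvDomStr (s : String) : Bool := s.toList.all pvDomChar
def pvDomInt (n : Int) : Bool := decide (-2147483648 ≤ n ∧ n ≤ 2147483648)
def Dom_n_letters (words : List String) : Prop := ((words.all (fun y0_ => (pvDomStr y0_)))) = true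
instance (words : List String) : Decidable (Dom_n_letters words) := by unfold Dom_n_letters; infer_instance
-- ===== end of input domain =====

-- B replaces A's hash-set membership loop by flatten-then-sort and one scan counting
-- adjacent changes (alternative algorithm, not claimed faster).

-- ===== PORT A =====
def n_letters (words : List String) : Int :=
  (words.foldl
    (fun (st : PySem.Set Char × Int) word =>
      word.toList.foldl
        (fun (st : PySem.Set Char × Int) letter =>
          if PySem.Set.contains st.1 letter then st
          else (PySem.Set.add st.1 letter, st.2 + 1)) st)
    (PySem.Set.empty, 0)).2

-- ===== PORT B =====
def n_letters_alt (words : List String) : Int :=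
  let chars := PySem.List.sorted (words.flatMap (fun word => word.toList)) (fun c => c) false
  (chars.foldl
    (fun (st : Int × Option Char) c =>
      if st.1 == 0 || some c != st.2 then (st.1 + 1, some c) else (st.1, some c))
    (0, none)).1

-- ===== PRECONDITION & SPEC =====
def Spec_n_letters (words : List String) (out : Int) : Prop := out = n_letters_alt words
instance (words : List String) (out : Int) : Decidable (Spec_n_letters words out) := by unfold Spec_n_letters; infer_instance

-- ===== CLAIM (what is proved, stated in full; the proofs are below) =====
def Claim_equal_n_letters : Prop := ∀ (words : List String), Dom_n_letters words → Spec_n_letters words (n_letters words)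

-- ===== LEMMAS AND PROOFS =====

-- A's inner loop over one word extends the set and keeps the counter equal to its size.
theorem a_inner (cs : List Char) (s : PySem.Set Char) :
    cs.foldl
      (fun (st : PySem.Set Char × Int) letter =>
        if PySem.Set.contains st.1 letter then st
        else (PySem.Set.add st.1 letter, st.2 + 1)) (s, (s.length : Int))
    = (PySem.Set.update s cs, ((PySem.Set.update s cs).length : Int)) := by
  induction cs generalizing s with
  | nil => simp [PySem.Set.update_nil]
  | cons c cs ih =>
    rw [PySem.Set.update_cons]
    by_cases h : c ∈ s
    · simpa [List.foldl_cons, h, PySem.Set.add_of_mem h] using ih s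
    · have hlen : ((PySem.Set.add s c).length : Int) = (s.length : Int) + 1 := by
        rw [PySem.Set.add_of_not_mem h]; simp
      have h2 := ih (PySem.Set.add s c)
      rw [hlen] at h2
      simpa [List.foldl_cons, h] using h2

-- A's whole loop: the counter is the number of distinct characters seen.
theorem a_outer (words : List String) (s : PySem.Set Char) :
    words.foldl
      (fun (st : PySem.Set Char × Int) word =>
        word.toList.foldl
          (fun (st : PySem.Set Char × Int) letter =>
            if PySem.Set.contains st.1 letter then st
            else (PySem.Set.add st.1 letter, st.2 + 1)) st)
      (s, (s.length : Int))
    = (PySem.Set.update s (words.flatMap (fun w => w.toList)),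
       ((PySem.Set.update s (words.flatMap (fun w => w.toList))).length : Int)) := by
  induction words generalizing s with
  | nil => simp [PySem.Set.update_nil]
  | cons w ws ih =>
    simp only [List.foldl, List.flatMap_cons, PySem.Set.update_append]
    rw [a_inner w.toList s, ih (PySem.Set.update s w.toList)]

theorem a_eq (words : List String) :
    n_letters words
      = ((PySem.Set.ofList (words.flatMap (fun w => w.toList))).length : Int) := by
  have h := a_outer words PySem.Set.empty
  have h0 : ((PySem.Set.empty : PySem.Set Char).length : Int) = 0 := by decide
  unfold n_letters
  rw [← h0, h]
  show ((PySem.Set.update [] (words.flatMap (fun w => w.toList))).length : Int) = _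
  rw [PySem.Set.update_nil_left]

-- B's scan after the first element: counting changes counts the not-yet-seen characters.
theorem b_scan (l : List Char) (n : Int) (p : Char) (hn : 1 ≤ n)
    (h1 : l.Pairwise (· ≤ ·)) (h2 : ∀ x ∈ l, p ≤ x) :
    (l.foldl
      (fun (st : Int × Option Char) c =>
        if st.1 == 0 || some c != st.2 then (st.1 + 1, some c) else (st.1, some c))
      (n, some p)).1
    = n + (((PySem.Set.ofList l).discard p).length : Int) := by
  induction l generalizing n p with
  | nil => simp [PySem.Set.discard]
  | cons c t ih =>
    have hn0 : (n == 0) = false := by simp; omega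
    have ht1 : t.Pairwise (· ≤ ·) := h1.of_cons
    rw [PySem.Set.ofList_cons]
    by_cases hc : c = p
    · subst hc
      have ht2 : ∀ x ∈ t, c ≤ x := fun x hx => h2 x (List.mem_cons_of_mem _ hx)
      have hd : ((PySem.Set.ofList t).discard c).discard c = (PySem.Set.ofList t).discard c := by
        simp [PySem.Set.discard, List.filter_filter]
      simp only [List.foldl, hn0, PySem.Set.discard, List.filter_cons]
      simp only [PySem.Set.discard, List.filter_filter] at hd ⊢
      simpa [hd] using ih n c hn ht1 ht2
    · have hpc : p < c := lt_of_le_of_ne (h2 c List.mem_cons_self) (fun e => hc e.symm)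
      have ht2 : ∀ x ∈ t, c ≤ x := fun x hx => (List.pairwise_cons.mp h1).1 x hx
      have hd : ((PySem.Set.ofList t).discard c).discard p = (PySem.Set.ofList t).discard c := by
        apply List.filter_eq_self.mpr
        intro a ha
        have ha' : a ∈ PySem.Set.ofList t := List.mem_of_mem_filter ha
        have ham : a ∈ t := by simpa [PySem.Set.mem_ofList] using ha'
        have : c ≤ a := ht2 a ham
        have : a ≠ p := fun e => absurd (e ▸ this) (not_le.mpr hpc)
        simpa using this
      have hstep := ih (n + 1) c (by omega) ht1 ht2
      have hcP : (!(c == p)) = true := by simp [hc]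
      rw [List.foldl_cons]
      have hhead :
          (if ((((n : Int), (some p : Option Char)).1 == 0
                || some c != (((n : Int), (some p : Option Char))).2) = true)
            then (((n : Int), (some p : Option Char)).1 + 1, some c)
            else (((n : Int), (some p : Option Char)).1, some c))
          = ((n + 1 : Int), (some c : Option Char)) := by
        simp [hn0, hc]
      rw [hhead, hstep]
      simp only [PySem.Set.discard] at hd ⊢
      rw [List.filter_cons, hcP]
      rw [hd]
      simp
      omega

theorem b_eq (words : List String) :
    n_letters_alt words
      = ((PySem.Set.ofList
            (PySem.List.sorted (words.flatMap (fun w => w.toList)) (fun c => c) false)).length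
          : Int) := by
  have key : ∀ (l : List Char), l.Pairwise (· ≤ ·) →
      (l.foldl
        (fun (st : Int × Option Char) c =>
          if st.1 == 0 || some c != st.2 then (st.1 + 1, some c) else (st.1, some c))
        (0, none)).1
      = ((PySem.Set.ofList l).length : Int) := by
    intro l hl
    cases l with
    | nil => simp
    | cons m t =>
      have h1 : t.Pairwise (· ≤ ·) := hl.of_cons
      have h2 : ∀ x ∈ t, m ≤ x := (List.pairwise_cons.mp hl).1
      rw [List.foldl_cons]
      have hhead :
          (if ((((0 : Int), (none : Option Char)).1 == 0
                || some m != (((0 : Int), (none : Option Char))).2) = true)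
            then (((0 : Int), (none : Option Char)).1 + 1, some m)
            else (((0 : Int), (none : Option Char)).1, some m))
          = ((1 : Int), (some m : Option Char)) := by
        simp
      rw [hhead, b_scan t 1 m (by omega) h1 h2, PySem.Set.ofList_cons]
      simp [PySem.Set.discard]
      omega
  show (List.foldl
        (fun (st : Int × Option Char) c =>
          if st.1 == 0 || some c != st.2 then (st.1 + 1, some c) else (st.1, some c))
        (0, none)
        (PySem.List.sorted (words.flatMap (fun word => word.toList)) (fun c => c) false)).1 = _
  exact key _ (by simpa using
    PySem.List.sorted_pairwise (words.flatMap (fun word => word.toList)) (fun c => c))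

-- set(L) and set(sorted(L)) have the same size.
theorem ofList_length_sorted (L : List Char) :
    (PySem.Set.ofList (PySem.List.sorted L (fun c => c) false)).length
      = (PySem.Set.ofList L).length := by
  apply List.Perm.length_eq
  apply (List.perm_ext_iff_of_nodup (PySem.Set.nodup_ofList _) (PySem.Set.nodup_ofList _)).mpr
  intro a
  simp [PySem.Set.mem_ofList, PySem.List.mem_sorted]

-- ===== VERDICT (by name: the statement is the Claim_ definition above) =====
theorem n_letters_spec : Claim_equal_n_letters := by
  intro words _
  unfold Spec_n_letters
  rw [a_eq, b_eq, ofList_length_sorted]
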